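-- pv_equiv track=rewrite | github.com/failturtle/set | server.py | isThereASet
-- ===== SOURCE A (Python) =====
-- def isSet(a0, a1, a2):
-- 	c0 = num_to_coordinates(a0)
-- 	c1 = num_to_coordinates(a1)
-- 	c2 = num_to_coordinates(a2)
-- 	for i in range(4):
-- 		s = set()
-- 		s.add(c0[i])
-- 		s.add(c1[i])
-- 		s.add(c2[i])
-- 		if len(s) == 2:
-- 			return False
-- 	return True
--
-- def isThereASet(a):
-- 	l = len(a)
-- 	for i in range(l):
-- 		for j in range(l):
-- 			for k in range(l):
-- 				if i != j and i != k and j != k: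
-- 					if isSet(a[i], a[j], a[k]):
-- 						return True
-- 	return False
--
-- def num_to_coordinates(k):
-- 	ret = []
-- 	while len(ret) < 4:
-- 		ret.append(k % 3)
-- 		k //= 3
-- 	return ret
-- ===== SOURCE B (Python) =====
-- def isThereASet(a):
--     # Normalise each card to its residue mod 81 (= its 4 base-3 coordinates),
--     # count residues once, then for each pair compute the unique completing
--     # card and look it up in the count table.
--     norm = [k % 81 for k in a]
--     counts = {}
--     for v in norm:
--         counts[v] = counts.get(v, 0) + 1
--     n = len(norm)
--     for i in range(n):
--         for j in range(i + 1, n):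
--             x, y = norm[i], norm[j]
--             t, p = 0, 1
--             for _ in range(4):
--                 dx, dy = x % 3, y % 3
--                 t += (dx if dx == dy else 3 - dx - dy) * p
--                 p *= 3
--                 x //= 3
--                 y //= 3
--             if counts.get(t, 0) >= 1 + (t == norm[i]) + (t == norm[j]):
--                 return True
--     return False
-- ===== Notes on version B (the rewrite author's own statement) =====
-- stated objective: alternative
-- what changed: Instead of testing every ordered triple of indices with a per-triple coordinate check, B normalises each card mod 81 once, builds a count table of residues, and for each unordered pair computes the unique completing card and looks up its count.
import Mathlib
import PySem

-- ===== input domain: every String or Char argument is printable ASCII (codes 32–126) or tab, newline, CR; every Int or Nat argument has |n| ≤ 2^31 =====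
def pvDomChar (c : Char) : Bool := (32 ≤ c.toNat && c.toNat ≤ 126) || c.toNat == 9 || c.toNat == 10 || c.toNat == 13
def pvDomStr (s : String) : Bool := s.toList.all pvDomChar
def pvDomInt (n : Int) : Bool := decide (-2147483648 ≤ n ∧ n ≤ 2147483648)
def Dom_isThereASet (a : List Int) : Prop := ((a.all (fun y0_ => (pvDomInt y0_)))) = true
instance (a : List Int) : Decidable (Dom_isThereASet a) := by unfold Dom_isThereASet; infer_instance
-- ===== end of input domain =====

-- B replaces A's scan over all ordered triples by: normalise cards mod 81, count
-- residues once, then for each pair compute the unique completing card and look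
-- it up in the count table (objective: alternative algorithm).


-- ===== PORT A =====
-- while len(ret) < 4: ret.append(k % 3); k //= 3   (exactly 4 iterations from ret = [])
def ntcLoop : Nat → Int → List Int → List Int
  | 0, _, ret => ret
  | n+1, k, ret => ntcLoop n (PySem.Int.floordiv k 3) (ret ++ [PySem.Int.mod k 3])

def numToCoordinates (k : Int) : List Int := ntcLoop 4 k []

-- indices i are always 0..3, c0/c1/c2 have length 4, so c0[i] never raises: pyGetD is exact here
def isSet (a0 a1 a2 : Int) : Bool :=
  let c0 := numToCoordinates a0
  let c1 := numToCoordinates a1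
  let c2 := numToCoordinates a2
  (PySem.List.pyRange 0 4 1).all (fun i =>
    let s := ((PySem.Set.empty.add (PySem.List.pyGetD c0 i 0)).add
                (PySem.List.pyGetD c1 i 0)).add (PySem.List.pyGetD c2 i 0)
    !(PySem.Set.len s == 2))

def isThereASet (a : List Int) : Bool :=
  let l : Int := a.length
  (PySem.List.pyRange 0 l 1).any (fun i =>
    (PySem.List.pyRange 0 l 1).any (fun j =>
      (PySem.List.pyRange 0 l 1).any (fun k =>
        (i != j && i != k && j != k) &&
          isSet (PySem.List.pyGetD a i 0) (PySem.List.pyGetD a j 0) (PySem.List.pyGetD a k 0))))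

-- ===== PORT B =====
-- the inner 4-step digit loop of Source B, state (t, p, x, y)
def thirdLoop : Nat → Int → Int → Int → Int → Int
  | 0, t, _, _, _ => t
  | n+1, t, p, x, y =>
    let dx := PySem.Int.mod x 3
    let dy := PySem.Int.mod y 3
    thirdLoop n (t + (if dx = dy then dx else 3 - dx - dy) * p) (p * 3)
      (PySem.Int.floordiv x 3) (PySem.Int.floordiv y 3)

def isThereASet_alt (a : List Int) : Bool :=
  let norm := a.map (fun k => PySem.Int.mod k 81)
  let counts := norm.foldl (fun d v => d.insert v (d.getD v 0 + 1)) PySem.Dict.empty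
  let n : Int := norm.length
  (PySem.List.pyRange 0 n 1).any (fun i =>
    (PySem.List.pyRange (i+1) n 1).any (fun j =>
      let t := thirdLoop 4 0 1 (PySem.List.pyGetD norm i 0) (PySem.List.pyGetD norm j 0)
      decide (1 + (if t = PySem.List.pyGetD norm i 0 then (1:Int) else 0)
                + (if t = PySem.List.pyGetD norm j 0 then 1 else 0) ≤ counts.getD t 0)))

-- ===== PRECONDITION & SPEC =====
def Spec_isThereASet (a : List Int) (out : Bool) : Prop := out = isThereASet_alt a
instance (a : List Int) (out : Bool) : Decidable (Spec_isThereASet a out) := by unfold Spec_isThereASet; infer_instance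

-- ===== CLAIM (what is proved, stated in full; the proofs are below) =====
def Claim_equal_isThereASet : Prop := ∀ (a : List Int), Dom_isThereASet a → Spec_isThereASet a (isThereASet a)

-- ===== LEMMAS AND PROOFS =====

-- the completing coordinate
def comp (x y : Int) : Int := if x = y then x else 3 - x - y

lemma comp_comm (x y : Int) : comp x y = comp y x := by
  unfold comp; split_ifs <;> omega

lemma comp_bounds {x y : Int} (hx : 0 ≤ x ∧ x < 3) (hy : 0 ≤ y ∧ y < 3) :
    0 ≤ comp x y ∧ comp x y < 3 := by
  unfold comp; split_ifs <;> omega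

lemma ntc_eq (k : Int) :
    numToCoordinates k = [k % 3, k / 3 % 3, k / 9 % 3, k / 27 % 3] := by
  show ntcLoop 4 k [] = _
  simp [ntcLoop]
  omega

lemma set2_iff (x y z : Int) (hx : 0 ≤ x ∧ x < 3) (hy : 0 ≤ y ∧ y < 3) (hz : 0 ≤ z ∧ z < 3) :
    (!(PySem.Set.len (((PySem.Set.empty.add x).add y).add z) == 2)) = true ↔ z = comp x y := by
  obtain ⟨hx0, hx1⟩ := hx; obtain ⟨hy0, hy1⟩ := hy; obtain ⟨hz0, hz1⟩ := hz
  interval_cases x <;> interval_cases y <;> interval_cases z <;> decide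

lemma isSet_iff_digits (a0 a1 a2 : Int) :
    isSet a0 a1 a2 = true ↔
      (a2 % 3 = comp (a0 % 3) (a1 % 3) ∧
       a2 / 3 % 3 = comp (a0 / 3 % 3) (a1 / 3 % 3) ∧
       a2 / 9 % 3 = comp (a0 / 9 % 3) (a1 / 9 % 3) ∧
       a2 / 27 % 3 = comp (a0 / 27 % 3) (a1 / 27 % 3)) := by
  have hr : PySem.List.pyRange 0 4 1 = [0, 1, 2, 3] := by decide
  have g0 : ∀ w x y z : Int, PySem.List.pyGetD [w,x,y,z] 0 0 = w := fun _ _ _ _ => rfl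
  have g1 : ∀ w x y z : Int, PySem.List.pyGetD [w,x,y,z] 1 0 = x := fun _ _ _ _ => rfl
  have g2 : ∀ w x y z : Int, PySem.List.pyGetD [w,x,y,z] 2 0 = y := fun _ _ _ _ => rfl
  have g3 : ∀ w x y z : Int, PySem.List.pyGetD [w,x,y,z] 3 0 = z := fun _ _ _ _ => rfl
  unfold isSet
  rw [hr, ntc_eq, ntc_eq, ntc_eq]
  simp only [List.all_cons, List.all_nil, Bool.and_true, Bool.and_eq_true, g0, g1, g2, g3]
  rw [set2_iff _ _ _ ⟨by omega, by omega⟩ ⟨by omega, by omega⟩ ⟨by omega, by omega⟩,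
     set2_iff _ _ _ ⟨by omega, by omega⟩ ⟨by omega, by omega⟩ ⟨by omega, by omega⟩,
     set2_iff _ _ _ ⟨by omega, by omega⟩ ⟨by omega, by omega⟩ ⟨by omega, by omega⟩,
     set2_iff _ _ _ ⟨by omega, by omega⟩ ⟨by omega, by omega⟩ ⟨by omega, by omega⟩]

lemma thirdLoop_eq (x y : Int) :
    thirdLoop 4 0 1 x y =
      comp (x % 3) (y % 3) + comp (x / 3 % 3) (y / 3 % 3) * 3
        + comp (x / 9 % 3) (y / 9 % 3) * 9 + comp (x / 27 % 3) (y / 27 % 3) * 27 := by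
  have e1 : x/3/3 = x/9 := by omega
  have e2 : x/9/3 = x/27 := by omega
  have f1 : y/3/3 = y/9 := by omega
  have f2 : y/9/3 = y/27 := by omega
  simp [thirdLoop, comp]
  rw [e1, f1, e2, f2]

lemma isSet_iff_third (a0 a1 a2 : Int) :
    isSet a0 a1 a2 = true ↔ thirdLoop 4 0 1 (PySem.Int.mod a0 81) (PySem.Int.mod a1 81) = PySem.Int.mod a2 81 := by
  rw [isSet_iff_digits, thirdLoop_eq,
    PySem.Int.mod_eq_emod_of_pos (b := 81) (by norm_num),
    PySem.Int.mod_eq_emod_of_pos (b := 81) (by norm_num),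
    PySem.Int.mod_eq_emod_of_pos (b := 81) (by norm_num)]
  have d01 : a0 % 81 % 3 = a0 % 3 := by omega
  have d02 : a0 % 81 / 3 % 3 = a0 / 3 % 3 := by omega
  have d03 : a0 % 81 / 9 % 3 = a0 / 9 % 3 := by omega
  have d04 : a0 % 81 / 27 % 3 = a0 / 27 % 3 := by omega
  have d11 : a1 % 81 % 3 = a1 % 3 := by omega
  have d12 : a1 % 81 / 3 % 3 = a1 / 3 % 3 := by omega
  have d13 : a1 % 81 / 9 % 3 = a1 / 9 % 3 := by omega
  have d14 : a1 % 81 / 27 % 3 = a1 / 27 % 3 := by omega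
  rw [d01, d02, d03, d04, d11, d12, d13, d14]
  have e3 : (0:Int) < 3 := by norm_num
  have b0 := comp_bounds (x := a0 % 3) (y := a1 % 3) ⟨Int.emod_nonneg _ (by norm_num), Int.emod_lt_of_pos _ e3⟩ ⟨Int.emod_nonneg _ (by norm_num), Int.emod_lt_of_pos _ e3⟩
  have b1 := comp_bounds (x := a0 / 3 % 3) (y := a1 / 3 % 3) ⟨Int.emod_nonneg _ (by norm_num), Int.emod_lt_of_pos _ e3⟩ ⟨Int.emod_nonneg _ (by norm_num), Int.emod_lt_of_pos _ e3⟩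
  have b2 := comp_bounds (x := a0 / 9 % 3) (y := a1 / 9 % 3) ⟨Int.emod_nonneg _ (by norm_num), Int.emod_lt_of_pos _ e3⟩ ⟨Int.emod_nonneg _ (by norm_num), Int.emod_lt_of_pos _ e3⟩
  have b3 := comp_bounds (x := a0 / 27 % 3) (y := a1 / 27 % 3) ⟨Int.emod_nonneg _ (by norm_num), Int.emod_lt_of_pos _ e3⟩ ⟨Int.emod_nonneg _ (by norm_num), Int.emod_lt_of_pos _ e3⟩
  generalize comp (a0 % 3) (a1 % 3) = c0 at b0 ⊢
  generalize comp (a0 / 3 % 3) (a1 / 3 % 3) = c1 at b1 ⊢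
  generalize comp (a0 / 9 % 3) (a1 / 9 % 3) = c2 at b2 ⊢
  generalize comp (a0 / 27 % 3) (a1 / 27 % 3) = c3 at b3 ⊢
  omega

lemma thirdLoop_comm (x y : Int) : thirdLoop 4 0 1 x y = thirdLoop 4 0 1 y x := by
  rw [thirdLoop_eq, thirdLoop_eq, comp_comm (x % 3), comp_comm (x / 3 % 3),
    comp_comm (x / 9 % 3), comp_comm (x / 27 % 3)]

lemma A_iff (a : List Int) :
    isThereASet a = true ↔
      ∃ i j k : Nat, ∃ hi : i < a.length, ∃ hj : j < a.length, ∃ hk : k < a.length,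
        i ≠ j ∧ i ≠ k ∧ j ≠ k ∧ isSet a[i] a[j] a[k] = true := by
  unfold isThereASet
  simp only [List.any_eq_true, PySem.List.mem_pyRange_one, Bool.and_eq_true, bne_iff_ne]
  constructor
  · rintro ⟨i, ⟨hi0, hin⟩, j, ⟨hj0, hjn⟩, k, ⟨hk0, hkn⟩, ⟨⟨hij, hik⟩, hjk⟩, hset⟩
    refine ⟨i.toNat, j.toNat, k.toNat, by omega, by omega, by omega, by omega, by omega, by omega, ?_⟩
    rwa [PySem.List.pyGetD_eq_getElem a 0 hi0 hin, PySem.List.pyGetD_eq_getElem a 0 hj0 hjn,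
      PySem.List.pyGetD_eq_getElem a 0 hk0 hkn] at hset
  · rintro ⟨i, j, k, hi, hj, hk, hij, hik, hjk, hset⟩
    refine ⟨i, ⟨by omega, by omega⟩, j, ⟨by omega, by omega⟩, k, ⟨by omega, by omega⟩,
      ⟨⟨by omega, by omega⟩, by omega⟩, ?_⟩
    rw [PySem.List.pyGetD_eq_getElem a 0 (by omega) (by omega),
      PySem.List.pyGetD_eq_getElem a 0 (by omega) (by omega),
      PySem.List.pyGetD_eq_getElem a 0 (by omega) (by omega)]
    simpa using hset

lemma count_card (l : List Int) (t : Int) :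
    (l.count t : Int) = ((Finset.range l.length).filter (fun k => l[k]? = some t)).card := by
  induction l using List.reverseRecOn with
  | nil => simp
  | append_singleton xs x ih =>
      rw [List.count_append, List.length_append]
      simp only [List.length_singleton, Finset.range_add_one, Finset.filter_insert]
      have hlast : (xs ++ [x])[xs.length]? = some x := by simp
      have hcongr : (Finset.range xs.length).filter (fun k => (xs ++ [x])[k]? = some t)
          = (Finset.range xs.length).filter (fun k => xs[k]? = some t) := by
        apply Finset.filter_congr
        intro k hk
        simp only [Finset.mem_range] at hk
        rw [List.getElem?_append_left hk]
      rw [hcongr]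
      by_cases hx : x = t
      · rw [if_pos (by rw [hlast, hx]), Finset.card_insert_of_notMem (by simp)]
        simp [hx, ih]
      · rw [if_neg (by rw [hlast]; simpa using fun h => hx h)]
        simp [hx, ih]

lemma count_third (l : List Int) (t : Int) (i j : Nat) (hi : i < l.length) (hj : j < l.length)
    (hij : i ≠ j) :
    (1 + (if t = l[i] then (1:Int) else 0) + (if t = l[j] then 1 else 0) ≤ l.count t) ↔
      ∃ k : Nat, ∃ hk : k < l.length, k ≠ i ∧ k ≠ j ∧ l[k] = t := by
  rw [count_card]
  set S := (Finset.range l.length).filter (fun k => l[k]? = some t) with hS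
  have hiS : i ∈ S ↔ t = l[i] := by
    simp [hS, Finset.mem_filter, Finset.mem_range, hi, eq_comm]
  have hjS : j ∈ S ↔ t = l[j] := by
    simp [hS, Finset.mem_filter, Finset.mem_range, hj, eq_comm]
  have hpair : (S ∩ ({i, j} : Finset Nat)).card
      = (if i ∈ S then 1 else 0) + (if j ∈ S then 1 else 0) := by
    have hsplit : S ∩ ({i, j} : Finset Nat) = S.filter (· = i) ∪ S.filter (· = j) := by
      ext k
      simp [Finset.mem_inter, Finset.mem_filter, Finset.mem_union, and_or_left]
    rw [hsplit, Finset.card_union_of_disjoint, Finset.filter_eq', Finset.filter_eq']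
    · split_ifs <;> simp
    · simp only [Finset.disjoint_filter]
      intro k _ hk
      subst hk
      exact hij
  have hkey : S.card = (S \ ({i, j} : Finset Nat)).card + (S ∩ ({i, j} : Finset Nat)).card :=
    (Finset.card_sdiff_add_card_inter S _).symm
  have hmem : ∀ k : Nat, k ∈ S \ ({i, j} : Finset Nat) ↔
      (∃ hk : k < l.length, k ≠ i ∧ k ≠ j ∧ l[k] = t) := by
    intro k
    simp only [Finset.mem_sdiff, hS, Finset.mem_filter, Finset.mem_range, Finset.mem_insert,
      Finset.mem_singleton, not_or]
    constructor
    · rintro ⟨⟨hk, hget⟩, hki, hkj⟩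
      rw [List.getElem?_eq_getElem hk] at hget
      exact ⟨hk, hki, hkj, by injection hget⟩
    · rintro ⟨hk, hki, hkj, hget⟩
      exact ⟨⟨hk, by rw [List.getElem?_eq_getElem hk, hget]⟩, hki, hkj⟩
  simp only [hiS, hjS] at hpair
  rw [hpair] at hkey
  constructor
  · intro h
    have hpos : 0 < (S \ ({i, j} : Finset Nat)).card := by
      split_ifs at h hkey <;> omega
    obtain ⟨k, hk⟩ := Finset.card_pos.mp hpos
    exact ⟨k, (hmem k).mp hk⟩
  · rintro ⟨k, hk⟩
    have hpos : 0 < (S \ ({i, j} : Finset Nat)).card :=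
      Finset.card_pos.mpr ⟨k, (hmem k).mpr hk⟩
    split_ifs at hkey ⊢ <;> omega

lemma B_iff (a : List Int) :
    isThereASet_alt a = true ↔
      ∃ i j : Nat, ∃ hi : i < a.length, ∃ hj : j < a.length, i < j ∧
        ∃ k : Nat, ∃ hk : k < a.length, k ≠ i ∧ k ≠ j ∧
          PySem.Int.mod a[k] 81 = thirdLoop 4 0 1 (PySem.Int.mod a[i] 81) (PySem.Int.mod a[j] 81) := by
  set f : Int → Int := fun k => PySem.Int.mod k 81 with hf
  unfold isThereASet_alt
  simp only [← hf, List.any_eq_true, PySem.List.mem_pyRange_one, decide_eq_true_eq,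
    PySem.Dict.getD_foldl_insert_add_one, List.length_map]
  constructor
  · rintro ⟨i, ⟨hi0, hin⟩, j, ⟨hj1, hjn⟩, hcnt⟩
    rw [PySem.List.pyGetD_eq_getElem (a.map f) 0 hi0 (by simpa using hin),
        PySem.List.pyGetD_eq_getElem (a.map f) 0 (by omega) (by simpa using hjn)] at hcnt
    have hiL : i.toNat < (a.map f).length := by simp; omega
    have hjL : j.toNat < (a.map f).length := by simp; omega
    have hd : ∀ t : Int, (PySem.Dict.empty : PySem.Dict Int Int).getD t 0 = 0 := fun _ => rfl
    rw [hd, zero_add] at hcnt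
    rw [count_third _ _ i.toNat j.toNat hiL hjL (by omega)] at hcnt
    obtain ⟨k, hk, hki, hkj, hget⟩ := hcnt
    refine ⟨i.toNat, j.toNat, by omega, by omega, by omega, k, by simpa using hk, hki, hkj, ?_⟩
    simp only [List.getElem_map] at hget ⊢
    exact hget
  · rintro ⟨i, j, hi, hj, hij, k, hk, hki, hkj, hget⟩
    refine ⟨i, ⟨by omega, by omega⟩, j, ⟨by omega, by omega⟩, ?_⟩
    rw [PySem.List.pyGetD_eq_getElem (a.map f) 0 (by omega) (by simp; omega),
        PySem.List.pyGetD_eq_getElem (a.map f) 0 (by omega) (by simp; omega)]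
    have hd : ∀ t : Int, (PySem.Dict.empty : PySem.Dict Int Int).getD t 0 = 0 := fun _ => rfl
    rw [hd, zero_add]
    simp only [Int.toNat_natCast]
    exact (count_third (a.map f) _ i j (by simpa using hi) (by simpa using hj)
      (by omega)).mpr ⟨k, by simpa using hk, hki, hkj, by simp only [List.getElem_map, hf]; exact hget⟩

-- ===== VERDICT (by name: the statement is the Claim_ definition above) =====
theorem isThereASet_spec : Claim_equal_isThereASet := by
  intro a _
  unfold Spec_isThereASet
  rw [Bool.eq_iff_iff, A_iff, B_iff]
  constructor
  · rintro ⟨i, j, k, hi, hj, hk, hij, hik, hjk, hset⟩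
    rw [isSet_iff_third] at hset
    rcases Nat.lt_or_ge i j with h | h
    · exact ⟨i, j, hi, hj, h, k, hk, fun e => hik e.symm, fun e => hjk e.symm, hset.symm⟩
    · have hji : j < i := lt_of_le_of_ne h (Ne.symm hij)
      exact ⟨j, i, hj, hi, hji, k, hk, fun e => hjk e.symm, fun e => hik e.symm,
        by rw [thirdLoop_comm]; exact hset.symm⟩
  · rintro ⟨i, j, hi, hj, hij, k, hk, hki, hkj, ht⟩
    exact ⟨i, j, k, hi, hj, hk, Nat.ne_of_lt hij, fun e => hki e.symm, fun e => hkj e.symm,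
      (isSet_iff_third _ _ _).2 ht.symm⟩
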